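-- pv_equiv track=rewrite | github.com/GeorgeKovshov/codewars2 | codewars5.py | solution
-- ===== SOURCE A (Python) =====
-- def solution(s, t):
--     base = s * t
--     summ = base + s
--     if summ > base:
--         base = summ
--     j = 1
--     t -= 3
--     while t >= 0:
--         var = 3*(s - j)
--         summ += -2*s + var
--         t -= 2
--         j += 1
--         if summ < base:
--             break
--         else:
--             base = summ
--     return base
-- ===== SOURCE B (Python) =====
-- def solution(s, t):
--     # Closed form: the loop adds concave increments s - 3*j until they turn
--     # negative or the t-budget runs out; the peak is computed directly.
--     if s <= 0:
--         return s * t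
--     n = (t - 1) // 2 if t >= 3 else 0
--     m = min(n, s // 3)
--     return s * (t + 1) + m * s - 3 * m * (m + 1) // 2
-- ===== Notes on version B (the rewrite author's own statement) =====
-- stated objective: faster
-- what changed: Replaces A's while-loop over the concave increment sequence s-3j with a closed-form formula: the number of summed increments is min((t-1)//2, s//3), so the peak is computed arithmetically in O(1).
import Mathlib
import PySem

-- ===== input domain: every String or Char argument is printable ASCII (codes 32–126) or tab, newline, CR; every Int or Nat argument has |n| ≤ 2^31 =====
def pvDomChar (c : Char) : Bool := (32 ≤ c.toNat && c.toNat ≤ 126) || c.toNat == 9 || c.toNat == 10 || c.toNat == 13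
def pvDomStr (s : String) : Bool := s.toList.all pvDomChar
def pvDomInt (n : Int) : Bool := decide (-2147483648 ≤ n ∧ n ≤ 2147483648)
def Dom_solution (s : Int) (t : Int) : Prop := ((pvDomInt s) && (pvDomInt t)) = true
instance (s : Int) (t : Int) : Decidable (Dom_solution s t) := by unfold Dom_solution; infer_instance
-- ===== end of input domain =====

-- B replaces A's O(t) loop over concave increments by a closed-form peak (objective: faster).

-- ===== PORT A =====
-- literal port of A's while loop; state (base, summ, t, j), t shrinks by 2 each pass
def solutionLoop (s : Int) (base : Int) (summ : Int) (t : Int) (j : Int) : Int :=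
  if h : t ≥ 0 then
    let var := 3 * (s - j)
    let summ' := summ + (-2 * s + var)
    let t' := t - 2
    let j' := j + 1
    if summ' < base then base
    else solutionLoop s summ' summ' t' j'
  else base
termination_by (t + 2).toNat
decreasing_by omega

def solution (s : Int) (t : Int) : Int :=
  let base := s * t
  let summ := base + s
  let base := if summ > base then summ else base
  solutionLoop s base summ (t - 3) 1

-- ===== PORT B =====
def solution_alt (s : Int) (t : Int) : Int :=
  if s ≤ 0 then s * t
  else
    let n := if t ≥ 3 then PySem.Int.floordiv (t - 1) 2 else 0
    let m := min n (PySem.Int.floordiv s 3)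
    s * (t + 1) + m * s - PySem.Int.floordiv (3 * m * (m + 1)) 2

-- ===== PRECONDITION & SPEC =====
def Spec_solution (s : Int) (t : Int) (out : Int) : Prop := out = solution_alt s t
instance (s : Int) (t : Int) (out : Int) : Decidable (Spec_solution s t out) := by unfold Spec_solution; infer_instance

-- ===== CLAIM (what is proved, stated in full; the proofs are below) =====
def Claim_equal_solution : Prop := ∀ (s : Int) (t : Int), Dom_solution s t → Spec_solution s t (solution s t)

-- ===== LEMMAS AND PROOFS =====

-- sum of the m increments s-3j, s-3(j+1), …  (division-free form of the loop's additions)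
def tri (s j : Int) : Nat → Int
  | 0 => 0
  | m + 1 => (s - 3 * j) + tri s (j + 1) m

theorem tri_closed (s j : Int) (m : Nat) :
    2 * tri s j m = 2 * m * s - 3 * m * (2 * j + m - 1) := by
  induction m generalizing j with
  | zero => simp [tri]
  | succ k ih =>
    have := ih (j + 1)
    simp only [tri]
    push_cast at *
    ring_nf at *
    linarith

-- loop characterisation for s > 0: entered with base = summ, it adds exactly
-- min (#iterations the t-budget allows) (#nonnegative increments) terms
theorem loop_eq (s : Int) (hs : 0 < s) (B T j : Int) (hj : 1 ≤ j) :
    solutionLoop s B B T j =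
      B + tri s j (min (if T ≥ 0 then T.toNat / 2 + 1 else 0)
                       (s / 3 + 1 - j).toNat) := by
  rw [solutionLoop]
  by_cases hT : T ≥ 0
  · have h3 : (3:Int) * (s / 3) ≤ s ∧ s < 3 * (s / 3) + 3 := by omega
    by_cases hneg : B + (-2 * s + 3 * (s - j)) < B
    · -- increment s - 3j negative: j > s/3, zero terms
      have hk : (s / 3 + 1 - j).toNat = 0 := by omega
      simp only [dif_pos hT, if_pos hneg, hk, Nat.min_zero, tri, add_zero]
    · -- increment nonnegative: peel one term and recurse
      have hrec := loop_eq s hs (B + (-2 * s + 3 * (s - j))) (T - 2) (j + 1) (by omega)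
      simp only [dif_pos hT, if_neg hneg]
      rw [hrec]
      have hk : (s / 3 + 1 - j).toNat = (s / 3 + 1 - (j + 1)).toNat + 1 := by omega
      have hn : (if T ≥ 0 then T.toNat / 2 + 1 else 0) =
          (if T - 2 ≥ 0 then (T - 2).toNat / 2 + 1 else 0) + 1 := by
        split_ifs <;> omega
      rw [hk, hn, Nat.succ_min_succ, tri]
      ring
  · have hn : (if T ≥ 0 then T.toNat / 2 + 1 else 0) = 0 := by simp [hT]
    simp only [dif_neg hT, hn, Nat.zero_min, tri, add_zero]
termination_by (T + 2).toNat
decreasing_by omega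

-- ===== VERDICT (by name: the statement is the Claim_ definition above) =====
theorem solution_spec : Claim_equal_solution := by
  unfold Claim_equal_solution
  intro s t _
  unfold Spec_solution solution solution_alt
  dsimp only
  by_cases hs : s ≤ 0
  · -- A: summ = s*t + s ≤ base, first iteration (if any) breaks at once
    have hgt : ¬ (s * t + s > s * t) := by nlinarith
    rw [if_neg hgt, if_pos hs, solutionLoop]
    by_cases hT : t - 3 ≥ 0
    · have hbr : s * t + s + (-2 * s + 3 * (s - 1)) < s * t := by nlinarith
      simp only [dif_pos hT, if_pos hbr]
    · simp only [dif_neg hT]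
  · have hs' : 0 < s := by omega
    have hgt : s * t + s > s * t := by nlinarith
    rw [if_pos hgt, if_neg hs, loop_eq s hs' (s * t + s) (t - 3) 1 le_rfl]
    have hfd2 : ∀ a : Int, PySem.Int.floordiv a 2 = a / 2 :=
      fun a => PySem.Int.floordiv_eq_ediv_of_pos (by norm_num)
    have hfd3 : PySem.Int.floordiv s 3 = s / 3 :=
      PySem.Int.floordiv_eq_ediv_of_pos (by norm_num)
    simp only [hfd2, hfd3]
    set m := min (if t - 3 ≥ 0 then (t - 3).toNat / 2 + 1 else 0) (s / 3 + 1 - 1).toNat with hm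
    have hM : (min (if t ≥ 3 then (t - 1) / 2 else 0) (s / 3)) = (m : Int) := by
      have h1 : 0 ≤ s / 3 := by omega
      simp only [hm]
      split_ifs with h <;> omega
    rw [hM]
    have htri := tri_closed s 1 m
    obtain ⟨c, hc⟩ := Int.even_mul_succ_self (m : Int)
    have h6 : 3 * (m : Int) * (m + 1) = 2 * (3 * c) := by linear_combination 3 * hc
    have heven : (3 * (m : Int) * (m + 1)) / 2 = 3 * c := by
      rw [h6]; exact Int.mul_ediv_cancel_left _ (by norm_num)
    rw [heven]
    have key : 2 * (s * t + s + tri s 1 m) = 2 * (s * (t + 1) + (m : Int) * s - 3 * c) := by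
      linear_combination htri - 3 * hc
    linarith
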